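-- pv_equiv track=rewrite | github.com/Bazinga9000/Polytris | Polytris.py | lineclearpoints
-- ===== SOURCE A (Python) =====
-- def lineclearpoints(clears, level):
--     if clears == 0: return 0
--
--     if clears == 1:
--         return 40 * (level + 1)
--
--     elif clears == 2:
--         return 100 * (level + 1)
--
--     elif clears == 3:
--         return 300 * (level + 1)
--
--     elif clears == 4:
--         return 1200 * (level + 1)
--
--     elif clears == 5:
--         return 3500 * (level + 1)
--
--     elif clears == 6:
--         return 6000 * (level + 1)
--
--     elif clears == 7:
--         return 9200 * (level + 1)
--
--     elif clears == 8:
--         return 13700 * (level + 1)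
--
--     elif clears == 9:
--         return 23000 * (level + 1)
--
--     elif clears == 10:
--         return 50000 * (level + 1)
--
--     elif clears == 11:
--         return 100000 * (level + 1)
--
--     elif clears == 12:
--         return 200000 * (level + 1)
--
--     else:
--         return sum([2 * lineclearpoints(clears-m, level) for m in [1,2,3]])
-- ===== SOURCE B (Python) =====
-- def lineclearpoints(clears, level):
--     base = [0, 40, 100, 300, 1200, 3500, 6000, 9200, 13700, 23000, 50000, 100000, 200000]
--     if clears <= 12:
--         return base[clears] * (level + 1)
--     a, b, c = base[-3], base[-2], base[-1]
--     for _ in range(13, clears + 1):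
--         a, b, c = b, c, 2 * (a + b + c)
--     return c * (level + 1)
-- ===== Notes on version B (the rewrite author's own statement) =====
-- stated objective: faster
-- what changed: Replaces the triple-branching recursion sum([2*f(clears-m,...) for m in [1,2,3]]) by a base-value table plus a single forward loop maintaining the last three coefficients, multiplying by (level+1) once at the end.
import Mathlib
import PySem

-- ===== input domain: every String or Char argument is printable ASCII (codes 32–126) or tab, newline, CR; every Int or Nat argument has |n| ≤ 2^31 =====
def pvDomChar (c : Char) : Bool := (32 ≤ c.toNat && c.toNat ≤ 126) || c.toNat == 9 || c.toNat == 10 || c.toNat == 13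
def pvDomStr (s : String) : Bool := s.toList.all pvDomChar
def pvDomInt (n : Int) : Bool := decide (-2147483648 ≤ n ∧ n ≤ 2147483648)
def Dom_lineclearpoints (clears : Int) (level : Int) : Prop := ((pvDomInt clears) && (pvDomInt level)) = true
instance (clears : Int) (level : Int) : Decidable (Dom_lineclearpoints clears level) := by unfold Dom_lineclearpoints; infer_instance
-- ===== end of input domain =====

-- B replaces A's exponential triple recursion by a table plus one forward loop on the last three coefficients (exponential-to-linear algorithm change).

-- ===== PORT A =====
-- literal transcription of A's branch chain; for clears ≥ 13 the else branch sums
-- [2*f(clears-1), 2*f(clears-2), 2*f(clears-3)] exactly as the Python list comprehension does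
def lineclearGoA : Nat → Int → Int
  | 0, _ => 0
  | 1, level => 40 * (level + 1)
  | 2, level => 100 * (level + 1)
  | 3, level => 300 * (level + 1)
  | 4, level => 1200 * (level + 1)
  | 5, level => 3500 * (level + 1)
  | 6, level => 6000 * (level + 1)
  | 7, level => 9200 * (level + 1)
  | 8, level => 13700 * (level + 1)
  | 9, level => 23000 * (level + 1)
  | 10, level => 50000 * (level + 1)
  | 11, level => 100000 * (level + 1)
  | 12, level => 200000 * (level + 1)
  | (n+13), level =>
      ([2 * lineclearGoA (n+12) level, 2 * lineclearGoA (n+11) level, 2 * lineclearGoA (n+10) level]).sum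

def lineclearpoints (clears : Int) (level : Int) : Int := lineclearGoA clears.toNat level

-- ===== PORT B =====
def lineclearBase : List Int := [0, 40, 100, 300, 1200, 3500, 6000, 9200, 13700, 23000, 50000, 100000, 200000]

-- one iteration of B's loop body: a, b, c = b, c, 2*(a+b+c)
def lineclearStep (t : Int × Int × Int) : Int × Int × Int := (t.2.1, t.2.2, 2 * (t.1 + t.2.1 + t.2.2))

def lineclearpoints_alt (clears : Int) (level : Int) : Int :=
  if clears ≤ 12 then
    (PySem.List.pyGet? lineclearBase clears).getD 0 * (level + 1)
  else
    (lineclearStep^[clears.toNat - 12] (50000, 100000, 200000)).2.2 * (level + 1)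

-- ===== PRECONDITION & SPEC =====
-- Pre_ excludes exactly the inputs on which Python A raises and returns no value: negative clears
-- (the recursion clears-1/-2/-3 never reaches a base case, RecursionError) and clears ≥ 512 (the
-- first recursive descent already exceeds CPython's default recursion limit of 1000 at two stack
-- frames per level — the call and its list-comprehension frame — so A raises RecursionError there too).
def Pre_lineclearpoints (clears : Int) (level : Int) : Prop := 0 ≤ clears ∧ clears ≤ 511
instance (clears : Int) (level : Int) : Decidable (Pre_lineclearpoints clears level) := by unfold Pre_lineclearpoints; infer_instance
def pvWitness_lineclearpoints : Int × Int := (14, 3)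


def Spec_lineclearpoints (clears : Int) (level : Int) (out : Int) : Prop := out = lineclearpoints_alt clears level
instance (clears : Int) (level : Int) (out : Int) : Decidable (Spec_lineclearpoints clears level out) := by unfold Spec_lineclearpoints; infer_instance

-- ===== CLAIM (what is proved, stated in full; the proofs are below) =====
def Claim_equal_lineclearpoints : Prop := ∀ (clears : Int) (level : Int), Dom_lineclearpoints clears level → Pre_lineclearpoints clears level → Spec_lineclearpoints clears level (lineclearpoints clears level)

-- ===== LEMMAS AND PROOFS =====

-- the level-independent coefficient satisfying the same recurrence as A's function
def lineclearCoef : Nat → Int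
  | 0 => 0
  | 1 => 40
  | 2 => 100
  | 3 => 300
  | 4 => 1200
  | 5 => 3500
  | 6 => 6000
  | 7 => 9200
  | 8 => 13700
  | 9 => 23000
  | 10 => 50000
  | 11 => 100000
  | 12 => 200000
  | (n+13) => 2 * lineclearCoef (n+12) + 2 * lineclearCoef (n+11) + 2 * lineclearCoef (n+10)

theorem lineclearGoA_eq_coef : ∀ (n : Nat) (level : Int), lineclearGoA n level = lineclearCoef n * (level + 1)
  | 0, l => by simp [lineclearGoA, lineclearCoef]
  | 1, l => by simp [lineclearGoA, lineclearCoef]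
  | 2, l => by simp [lineclearGoA, lineclearCoef]
  | 3, l => by simp [lineclearGoA, lineclearCoef]
  | 4, l => by simp [lineclearGoA, lineclearCoef]
  | 5, l => by simp [lineclearGoA, lineclearCoef]
  | 6, l => by simp [lineclearGoA, lineclearCoef]
  | 7, l => by simp [lineclearGoA, lineclearCoef]
  | 8, l => by simp [lineclearGoA, lineclearCoef]
  | 9, l => by simp [lineclearGoA, lineclearCoef]
  | 10, l => by simp [lineclearGoA, lineclearCoef]
  | 11, l => by simp [lineclearGoA, lineclearCoef]
  | 12, l => by simp [lineclearGoA, lineclearCoef]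
  | (n+13), l => by
      simp [lineclearGoA, lineclearCoef, lineclearGoA_eq_coef (n+12) l,
        lineclearGoA_eq_coef (n+11) l, lineclearGoA_eq_coef (n+10) l]
      ring

theorem lineclearStep_iterate (k : Nat) :
    lineclearStep^[k] (50000, 100000, 200000) =
      (lineclearCoef (k + 10), lineclearCoef (k + 11), lineclearCoef (k + 12)) := by
  induction k with
  | zero => simp [lineclearCoef]
  | succ k ih =>
      rw [Function.iterate_succ_apply', ih]
      show (lineclearCoef (k + 11), lineclearCoef (k + 12),
        2 * (lineclearCoef (k + 10) + lineclearCoef (k + 11) + lineclearCoef (k + 12))) = _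
      have : k + 1 + 12 = k + 13 := by omega
      rw [show k + 1 + 10 = k + 11 from by omega, show k + 1 + 11 = k + 12 from by omega, this]
      show _ = (_, _, lineclearCoef (k + 13))
      simp [lineclearCoef]
      ring

-- ===== VERDICT (by name: the statement is the Claim_ definition above) =====
theorem lineclearpoints_spec : Claim_equal_lineclearpoints := by
  intro clears level _ hpre
  unfold Spec_lineclearpoints lineclearpoints lineclearpoints_alt
  by_cases h : clears ≤ 12
  · rw [if_pos h]
    have h0 : (0:Int) ≤ clears := hpre.1
    interval_cases clears <;>
      simp [lineclearGoA, lineclearBase, PySem.List.pyGet?, PySem.List.pyIdx?, lineclearCoef]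
  · rw [if_neg h]
    rw [lineclearStep_iterate, lineclearGoA_eq_coef]
    have : clears.toNat - 12 + 12 = clears.toNat := by omega
    rw [this]
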